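-- pv_equiv track=rewrite | github.com/shirosweets/Secret-Voldemort-20 | helpers_functions.py | encode_deck
-- ===== SOURCE A (Python) =====
-- def encode_deck(deckList : list):
--     """
--     Returns a encoded deck as int
--     deckList = [1, 0, 1, 1, 1, 1, 1, 0, 1, 1, 1, 0, 0, 0, 1, 0, 1]
--     returns : 228805 = 0b110111110111000101
--     deckList [1,1,0,0] => deckInt 0b[1]1100 first bit with 1 points to start of deck
--     First bit with 1 of deckInt point the size of deck. Doesn't encode a card
--     """
--     deckInt = 1   # Represents an empty deck
--     for card in deckList:
--         if (card == 0):
--             deckInt = (deckInt << 1)    # add phoenix card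
--         else:
--             deckInt = (deckInt << 1) + 1    # add death_eater card
--     return deckInt # Return encoded "deck" for database
-- ===== SOURCE B (Python) =====
-- def encode_deck(deckList : list):
--     # Closed form: sentinel bit 2**n plus one power of two per nonzero card,
--     # weighted by its distance from the end of the deck.
--     return (1 << len(deckList)) + sum(
--         1 << i for i, c in enumerate(reversed(deckList)) if c != 0)
-- ===== Notes on version B (the rewrite author's own statement) =====
-- stated objective: alternative
-- what changed: Replaces the sequential shift-accumulator (Horner) loop with a closed-form sum: the sentinel 2**len plus one power of two per nonzero card, indexed by a reversed enumeration.
import Mathlib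
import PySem

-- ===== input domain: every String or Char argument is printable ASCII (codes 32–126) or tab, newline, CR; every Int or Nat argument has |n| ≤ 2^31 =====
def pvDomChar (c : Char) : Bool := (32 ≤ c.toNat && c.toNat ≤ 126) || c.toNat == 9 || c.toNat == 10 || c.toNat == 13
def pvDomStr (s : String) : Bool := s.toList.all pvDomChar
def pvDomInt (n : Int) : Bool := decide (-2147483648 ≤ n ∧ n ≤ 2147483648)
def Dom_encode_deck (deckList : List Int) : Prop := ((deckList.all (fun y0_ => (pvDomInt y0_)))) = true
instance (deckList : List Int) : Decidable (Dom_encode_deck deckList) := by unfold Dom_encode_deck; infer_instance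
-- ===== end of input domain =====

-- B replaces A's sequential shift-accumulator loop by a closed-form sum of powers of two (alternative decomposition, same cost).

-- ===== PORT A =====
-- A: deckInt = 1; for card in deckList: deckInt = deckInt << 1 (+ 1 if card != 0)
def encode_deck (deckList : List Int) : Int :=
  deckList.foldl (fun (deckInt : Int) card =>
    if card == 0 then deckInt <<< (1 : Nat) else (deckInt <<< (1 : Nat)) + 1) 1

-- ===== PORT B =====
-- B: (1 << len) + sum(1 << i for i, c in enumerate(reversed(deckList)) if c != 0)
-- enumerate indices start at 0, so .toNat on the (nonnegative) index is exact.
def encode_deck_alt (deckList : List Int) : Int :=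
  ((1 : Int) <<< deckList.length) +
    (((PySem.List.enumerate deckList.reverse 0).filter (fun p => p.2 != 0)).map
      (fun p => (1 : Int) <<< p.1.toNat)).sum

-- ===== PRECONDITION & SPEC =====
def Spec_encode_deck (deckList : List Int) (out : Int) : Prop := out = encode_deck_alt deckList
instance (deckList : List Int) (out : Int) : Decidable (Spec_encode_deck deckList out) := by unfold Spec_encode_deck; infer_instance

-- ===== CLAIM (what is proved, stated in full; the proofs are below) =====
def Claim_equal_encode_deck : Prop := ∀ (deckList : List Int), Dom_encode_deck deckList → Spec_encode_deck deckList (encode_deck deckList)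

-- ===== LEMMAS AND PROOFS =====

-- LSB-first value of a bit list
def pvW : List Int → Int
  | [] => 0
  | c :: t => (if c = 0 then 0 else 1) + 2 * pvW t

theorem pvW_append_singleton (r : List Int) (c : Int) :
    pvW (r ++ [c]) = pvW r + (if c = 0 then 0 else 1) * 2 ^ r.length := by
  induction r with
  | nil => simp [pvW]
  | cons x t ih => simp [pvW, ih, pow_succ]; split_ifs <;> ring

theorem encode_deck_eq (l : List Int) (a : Int) :
    l.foldl (fun (deckInt : Int) card =>
      if card == 0 then deckInt <<< (1 : Nat) else (deckInt <<< (1 : Nat)) + 1) a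
      = a * 2 ^ l.length + pvW l.reverse := by
  induction l generalizing a with
  | nil => simp [pvW]
  | cons c t ih =>
    simp only [List.foldl_cons, List.reverse_cons, ih, pvW_append_singleton,
      List.length_reverse, List.length_cons]
    by_cases hc : c = 0 <;>
      simp [hc, pow_succ, Int.shiftLeft_eq] <;> ring

theorem pvSum_eq (r : List Int) (k : Nat) :
    (((PySem.List.enumerate r (k : Int)).filter (fun p => p.2 != 0)).map
      (fun p => (1 : Int) <<< p.1.toNat)).sum = 2 ^ k * pvW r := by
  induction r generalizing k with
  | nil => simp [PySem.List.enumerate_nil, pvW]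
  | cons c t ih =>
    rw [PySem.List.enumerate_cons,
      show ((k : Int) + 1) = ((k + 1 : Nat) : Int) by push_cast; ring]
    by_cases hc : c = 0
    · rw [List.filter_cons, if_neg (by simp [hc]), ih]
      simp [pvW, hc, pow_succ]; ring
    · rw [List.filter_cons, if_pos (by simp [hc]), List.map_cons,
        List.sum_cons, ih]
      rw [Int.shiftLeft_eq_mul_pow]
      simp [pvW, hc, pow_succ]; push_cast; ring

-- ===== VERDICT (by name: the statement is the Claim_ definition above) =====
theorem encode_deck_spec : Claim_equal_encode_deck := by
  intro l _
  show encode_deck l = encode_deck_alt l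
  rw [encode_deck, encode_deck_alt, encode_deck_eq]
  have h := pvSum_eq l.reverse 0
  rw [Nat.cast_zero] at h
  rw [h]
  simp [Int.shiftLeft_eq]
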